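-- pv_equiv track=rewrite | github.com/Murphy-Joe/AbandonedWordleAlgo | old/letter_count.py | letters_to_guess
-- ===== SOURCE A (Python) =====
-- def filter_words(word_list: list[str], letter_list: list[str]) -> list[str]:
--     filtered_words = []
--     for word in word_list:
--         if all(letter in word for letter in letter_list):
--             filtered_words.append(word)
--     return filtered_words
--
-- def letters_to_guess(frequency_results: dict, words_left: list[str]) -> list[str]:
--     ltrs_to_guess = []
--     for idx, letter in enumerate(frequency_results.keys()):
--         if idx <= 4 and filter_words(words_left, ltrs_to_guess + [letter]):
--             ltrs_to_guess.append(letter)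
--         else:
--             break
--     return ltrs_to_guess
-- ===== SOURCE B (Python) =====
-- def letters_to_guess(frequency_results: dict, words_left: list[str]) -> list[str]:
--     ltrs_to_guess = []
--     current = words_left
--     for idx, letter in enumerate(frequency_results.keys()):
--         if idx > 4:
--             break
--         narrowed = [w for w in current if letter in w]
--         if not narrowed:
--             break
--         ltrs_to_guess.append(letter)
--         current = narrowed
--     return ltrs_to_guess
-- ===== Notes on version B (the rewrite author's own statement) =====
-- stated objective: faster
-- what changed: B maintains a running candidate set and narrows it once per letter, instead of A's re-filtering all of words_left against the whole growing letter list at every step.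
import Mathlib
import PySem

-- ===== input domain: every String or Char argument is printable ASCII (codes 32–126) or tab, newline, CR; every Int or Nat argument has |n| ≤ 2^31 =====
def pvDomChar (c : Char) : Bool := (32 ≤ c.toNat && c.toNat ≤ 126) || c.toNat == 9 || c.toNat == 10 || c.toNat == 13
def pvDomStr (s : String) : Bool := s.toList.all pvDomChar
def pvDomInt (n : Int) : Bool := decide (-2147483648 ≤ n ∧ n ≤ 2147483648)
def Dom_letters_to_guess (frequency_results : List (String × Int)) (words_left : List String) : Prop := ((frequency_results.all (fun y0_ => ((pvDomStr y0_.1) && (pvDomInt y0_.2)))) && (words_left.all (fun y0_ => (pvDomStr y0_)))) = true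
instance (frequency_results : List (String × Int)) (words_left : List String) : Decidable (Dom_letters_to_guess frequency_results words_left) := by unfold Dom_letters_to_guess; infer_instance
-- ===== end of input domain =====

-- B replaces A's per-letter full rescan of words_left against the whole growing letter list
-- by a maintained candidate set narrowed once per letter (objective: faster, constant-factor).

-- ===== PORT A =====
def filter_words (word_list : List String) (letter_list : List String) : List String :=
  word_list.foldl
    (fun filtered_words word =>
      if letter_list.all (fun letter => PySem.Str.isIn letter word)
      then filtered_words ++ [word] else filtered_words) []

-- the enumerate loop of A, with early break
def ltgLoopA (words_left : List String) : List String → Int → List String → List String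
  | [], _, ltrs => ltrs
  | letter :: rest, idx, ltrs =>
    if idx ≤ 4 && !(filter_words words_left (ltrs ++ [letter])).isEmpty
    then ltgLoopA words_left rest (idx + 1) (ltrs ++ [letter])
    else ltrs

def letters_to_guess (frequency_results : List (String × Int)) (words_left : List String) : List String :=
  ltgLoopA words_left (PySem.Dict.ofList frequency_results).keys 0 []

-- ===== PORT B =====
-- the loop of B: maintains the running candidate list `current`, narrowed once per letter
def ltgLoopB : List String → Int → List String → List String → List String
  | [], _, ltrs, _ => ltrs
  | letter :: rest, idx, ltrs, current =>
    if idx > 4 then ltrs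
    else
      let narrowed := current.filter (fun w => PySem.Str.isIn letter w)
      if narrowed.isEmpty then ltrs
      else ltgLoopB rest (idx + 1) (ltrs ++ [letter]) narrowed

def letters_to_guess_alt (frequency_results : List (String × Int)) (words_left : List String) : List String :=
  ltgLoopB (PySem.Dict.ofList frequency_results).keys 0 [] words_left

-- ===== PRECONDITION & SPEC =====
def Spec_letters_to_guess (frequency_results : List (String × Int)) (words_left : List String) (out : List String) : Prop := out = letters_to_guess_alt frequency_results words_left
instance (frequency_results : List (String × Int)) (words_left : List String) (out : List String) : Decidable (Spec_letters_to_guess frequency_results words_left out) := by unfold Spec_letters_to_guess; infer_instance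

-- ===== CLAIM (what is proved, stated in full; the proofs are below) =====
def Claim_equal_letters_to_guess : Prop := ∀ (frequency_results : List (String × Int)) (words_left : List String), Dom_letters_to_guess frequency_results words_left → Spec_letters_to_guess frequency_results words_left (letters_to_guess frequency_results words_left)

-- ===== LEMMAS AND PROOFS =====

theorem filter_words_eq_filter (word_list letter_list : List String) :
    filter_words word_list letter_list
      = word_list.filter (fun word => letter_list.all (fun letter => PySem.Str.isIn letter word)) := by
  simpa [filter_words] using
    PySem.List.foldl_append_if_eq_filter
      (l := word_list) (p := fun word => letter_list.all (fun letter => PySem.Str.isIn letter word)) (acc := [])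

theorem ltgLoop_eq (keys : List String) : ∀ (idx : Int) (ltrs : List String)
    (words_left current : List String),
    current = words_left.filter (fun w => ltrs.all (fun letter => PySem.Str.isIn letter w)) →
    ltgLoopA words_left keys idx ltrs = ltgLoopB keys idx ltrs current := by
  induction keys with
  | nil => intro idx ltrs wl cur _; rfl
  | cons letter rest ih =>
    intro idx ltrs wl cur hcur
    have hnarrow : cur.filter (fun w => PySem.Str.isIn letter w)
        = filter_words wl (ltrs ++ [letter]) := by
      rw [hcur, filter_words_eq_filter, List.filter_filter]
      apply List.filter_congr
      intro w _
      simp [List.all_append, Bool.and_comm]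
    by_cases h4 : idx ≤ 4
    · have h4' : ¬ idx > 4 := by omega
      by_cases hne : (filter_words wl (ltrs ++ [letter])).isEmpty
      · have hne' : filter_words wl (ltrs ++ [letter]) = [] := List.isEmpty_iff.mp hne
        simp only [ltgLoopA, ltgLoopB]
        rw [hnarrow]
        simp [hne', h4']
      · have hA : ltgLoopA wl (letter :: rest) idx ltrs
            = ltgLoopA wl rest (idx + 1) (ltrs ++ [letter]) := by
          simp only [ltgLoopA]
          rw [if_pos (by simp [h4, hne])]
        have hB : ltgLoopB (letter :: rest) idx ltrs cur
            = ltgLoopB rest (idx + 1) (ltrs ++ [letter])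
                (cur.filter (fun w => PySem.Str.isIn letter w)) := by
          simp only [ltgLoopB]
          rw [if_neg h4', if_neg (by rw [hnarrow]; exact hne)]
        rw [hA, hB]
        exact ih (idx + 1) (ltrs ++ [letter]) wl _
          (by rw [hnarrow, filter_words_eq_filter])
    · have h4' : idx > 4 := lt_of_not_ge h4
      simp only [ltgLoopA, ltgLoopB]
      rw [if_pos h4', if_neg (by simp [h4])]

-- ===== VERDICT (by name: the statement is the Claim_ definition above) =====
theorem letters_to_guess_spec : Claim_equal_letters_to_guess := by
  intro fr wl _
  unfold Spec_letters_to_guess letters_to_guess letters_to_guess_alt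
  exact ltgLoop_eq _ 0 [] wl wl (by simp)
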